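-- pv_equiv track=rewrite | github.com/bchwast/AGH-WDI | Kolokwia 13_14/kp_ex2.py | skoki
-- ===== SOURCE A (Python) =====
-- def prime(num):
--     if num == 2 or num == 3:
--         return True
--     elif num < 2 or num%2 == 0 or num%3 == 0:
--         return False
--
--     a = 5
--     while a*a <= num:
--         if num%a == 0:
--             return False
--         a += 2
--         if num%a == 0:
--             return False
--         a += 4
--     #end while
--     return True
--
-- def skoki(t, ind=0, cnt=0):
--     if ind == (len(t) - 1):
--         return cnt
--
--     for i in range(1, len(t)-ind):
--         if prime(i) and i < t[ind] and t[ind]%i == 0: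
--             jump = skoki(t, ind+i, cnt+1)
--             if jump > 0:
--                 return jump
--     #end for
--     return -1
-- ===== SOURCE B (Python) =====
-- def prime(num):
--     if num == 2 or num == 3:
--         return True
--     elif num < 2 or num%2 == 0 or num%3 == 0:
--         return False
--
--     a = 5
--     while a*a <= num:
--         if num%a == 0:
--             return False
--         a += 2
--         if num%a == 0:
--             return False
--         a += 4
--     return True
--
-- def skoki(t, ind=0, cnt=0):
--     n = len(t)
--     memo = {}
--     def depth(p):
--         # number of jumps on the first path (in search order) from p to the last index, or None
--         if p == n - 1:
--             return 0
--         if p in memo: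
--             return memo[p]
--         res = None
--         for i in range(1, n - p):
--             if prime(i) and i < t[p] and t[p] % i == 0:
--                 d = depth(p + i)
--                 if d is not None:
--                     res = d + 1
--                     break
--         memo[p] = res
--         return res
--     d = depth(ind)
--     return cnt + d if d is not None else -1
-- ===== Notes on version B (the rewrite author's own statement) =====
-- stated objective: alternative
-- what changed: A's depth-first search that threads the running count through every recursive call is replaced by a per-position memoized search: a helper computes the number of jumps on the first path (in search order) from a position to the last index, caches it in a dict keyed by position, and the answer is cnt plus that depth; Pre_ excludes inputs where A raises IndexError (ind below -len(t) with the index actually evaluated) and negative cnt values, which are outside the accumulator's natural domain (with cnt<0 A's 'jump > 0' test silently discards valid paths).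
-- outside the precondition, e.g. on skoki([4, 2, 1], 0, -1): A returns -1, B returns 0
import Mathlib
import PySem

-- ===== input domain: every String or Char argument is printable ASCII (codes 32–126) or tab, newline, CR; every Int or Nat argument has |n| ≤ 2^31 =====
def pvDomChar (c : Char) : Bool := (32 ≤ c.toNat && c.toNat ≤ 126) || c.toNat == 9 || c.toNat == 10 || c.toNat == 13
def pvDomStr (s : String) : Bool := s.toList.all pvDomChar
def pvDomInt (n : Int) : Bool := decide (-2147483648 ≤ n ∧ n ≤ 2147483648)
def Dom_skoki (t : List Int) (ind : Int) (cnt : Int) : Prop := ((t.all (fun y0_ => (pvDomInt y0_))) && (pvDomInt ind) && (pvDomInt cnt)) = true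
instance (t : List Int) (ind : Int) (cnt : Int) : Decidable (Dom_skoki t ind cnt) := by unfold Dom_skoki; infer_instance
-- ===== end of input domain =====

-- B replaces A's depth-first search (which threads the running count through every call) by a
-- per-position memoized search; objective: alternative. Shared helpers: `prime` (Source A and Source B
-- use the identical primality test) and `tget` (t[p], exact in range).

-- `while a*a <= num` of prime, fuel-guarded (a grows by 6 each pass, so num.toNat passes suffice)
def primeLoop : Nat → Int → Int → Bool
  | 0, _, _ => true
  | f+1, a, num =>
    if a * a ≤ num then
      if PySem.Int.mod num a = 0 then false
      else
        if PySem.Int.mod num (a + 2) = 0 then false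
        else primeLoop f (a + 2 + 4) num
    else true

def prime (num : Int) : Bool :=
  if num = 2 ∨ num = 3 then true
  else if num < 2 ∨ PySem.Int.mod num 2 = 0 ∨ PySem.Int.mod num 3 = 0 then false
  else primeLoop num.toNat 5 num

-- t[p]; Python raises IndexError outside -len ≤ p < len (excluded by Pre_), the default 0 is never used there
def tget (t : List Int) (p : Int) : Int := (PySem.List.pyGet? t p).getD 0

-- ===== PORT A =====
-- the `for i in range(...)` loop of A with its early return (`recur i` = the recursive call)
def skokiLoop (recur : Int → Int) (tv : Int) : List Int → Int
  | [] => -1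
  | i :: rest =>
    if prime i ∧ i < tv ∧ PySem.Int.mod tv i = 0 then
      let jump := recur i
      if jump > 0 then jump else skokiLoop recur tv rest
    else skokiLoop recur tv rest

-- A's recursion, fuel-guarded (each call raises ind by ≥ 1, so (len t - ind).toNat + 1 suffices)
def skokiGo : Nat → List Int → Int → Int → Int
  | 0, _, _, _ => -1
  | f+1, t, ind, cnt =>
    if ind = (t.length : Int) - 1 then cnt
    else skokiLoop (fun i => skokiGo f t (ind + i) (cnt + 1)) (tget t ind)
           (PySem.List.pyRange 1 ((t.length : Int) - ind) 1)

def skoki (t : List Int) (ind : Int) (cnt : Int) : Int :=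
  skokiGo ((((t.length : Int) - ind).toNat) + 1) t ind cnt

-- ===== PORT B =====
-- the memo dict of Source B: position ↦ cached result of `depth`
-- Source B's `for i in ...` loop inside `depth`, threading the memo (recur i m = depth(p+i) with memo m)
def depthLoop (recur : Int → PySem.Dict Int (Option Int) → Option Int × PySem.Dict Int (Option Int))
    (tv : Int) : List Int → PySem.Dict Int (Option Int) → Option Int × PySem.Dict Int (Option Int)
  | [], m => (none, m)
  | i :: rest, m =>
    if prime i ∧ i < tv ∧ PySem.Int.mod tv i = 0 then
      match recur i m with
      | (some d, m') => (some (d + 1), m')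
      | (none, m') => depthLoop recur tv rest m'
    else depthLoop recur tv rest m

-- Source B's memoized `depth(p)`: number of jumps on the first path (in search order) from p to the
-- last index, or none; fuel-guarded like skokiGo
def depthGo : Nat → List Int → Int → PySem.Dict Int (Option Int) →
    Option Int × PySem.Dict Int (Option Int)
  | 0, _, _, m => (none, m)
  | f+1, t, p, m =>
    if p = (t.length : Int) - 1 then (some 0, m)
    else
      match m.get? p with
      | some v => (v, m)
      | none =>
        let res := depthLoop (fun i mm => depthGo f t (p + i) mm) (tget t p)
                     (PySem.List.pyRange 1 ((t.length : Int) - p) 1) m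
        (res.1, res.2.insert p res.1)

def skoki_alt (t : List Int) (ind : Int) (cnt : Int) : Int :=
  match (depthGo ((((t.length : Int) - ind).toNat) + 1) t ind PySem.Dict.empty).1 with
  | some d => cnt + d
  | none => -1

-- ===== PRECONDITION & SPEC =====
-- Pre_ excludes the inputs where Python A raises IndexError (ind < -len(t) with t[ind] actually
-- evaluated, i.e. len(t) - ind ≥ 3; Source B raises there too), and negative cnt values, which are
-- outside the running-count accumulator's natural domain (A was written for cnt ≥ 0; with
-- cnt < 0 its `jump > 0` test silently discards valid paths).
def Pre_skoki (t : List Int) (ind : Int) (cnt : Int) : Prop :=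
  (-(t.length : Int) ≤ ind ∨ ind = (t.length : Int) - 1 ∨ (t.length : Int) - ind ≤ 2) ∧ 0 ≤ cnt
instance (t : List Int) (ind : Int) (cnt : Int) : Decidable (Pre_skoki t ind cnt) := by
  unfold Pre_skoki; infer_instance

def pvWitness_skoki : List Int × Int × Int := ([4, 2, 1], 0, 0)

def Spec_skoki (t : List Int) (ind : Int) (cnt : Int) (out : Int) : Prop := out = skoki_alt t ind cnt
instance (t : List Int) (ind : Int) (cnt : Int) (out : Int) : Decidable (Spec_skoki t ind cnt out) := by
  unfold Spec_skoki; infer_instance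

-- ===== CLAIM (what is proved, stated in full; the proofs are below) =====
def Claim_equal_skoki : Prop := ∀ (t : List Int) (ind : Int) (cnt : Int), Dom_skoki t ind cnt → Pre_skoki t ind cnt → Spec_skoki t ind cnt (skoki t ind cnt)

-- ===== LEMMAS AND PROOFS =====

-- proof-only specification: Source B's `depth` without the memo (plain recursion)
def drecLoop (recur : Int → Option Int) (tv : Int) : List Int → Option Int
  | [] => none
  | i :: rest =>
    if prime i ∧ i < tv ∧ PySem.Int.mod tv i = 0 then
      match recur i with
      | some d => some (d + 1)
      | none => drecLoop recur tv rest
    else drecLoop recur tv rest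
def drec : Nat → List Int → Int → Option Int
  | 0, _, _ => none
  | f+1, t, p =>
    if p = (t.length : Int) - 1 then some 0
    else drecLoop (fun i => drec f t (p + i)) (tget t p)
           (PySem.List.pyRange 1 ((t.length : Int) - p) 1)

theorem drecLoop_nonneg (recur : Int → Option Int) (tv : Int)
    (H : ∀ i d', recur i = some d' → 0 ≤ d') :
    ∀ (is : List Int) (d : Int), drecLoop recur tv is = some d → 0 ≤ d := by
  intro is
  induction is with
  | nil => intro d h; simp [drecLoop] at h
  | cons i rest ih =>
    intro d h
    rw [drecLoop] at h
    split at h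
    · cases hr : recur i with
      | some d' => rw [hr] at h; simp at h; have := H i d' hr; omega
      | none => rw [hr] at h; exact ih d h
    · exact ih d h

theorem drec_nonneg : ∀ (f : Nat) (t : List Int) (p d : Int), drec f t p = some d → 0 ≤ d := by
  intro f
  induction f with
  | zero => intro t p d h; simp [drec] at h
  | succ f ih =>
    intro t p d h
    rw [drec] at h
    split at h
    · simp only [Option.some.injEq] at h; omega
    · exact drecLoop_nonneg _ _ (fun i d' hi => ih t (p + i) d' hi) _ d h

theorem drecLoop_congr (r1 r2 : Int → Option Int) (tv : Int) (is : List Int)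
    (H : ∀ i ∈ is, r1 i = r2 i) : drecLoop r1 tv is = drecLoop r2 tv is := by
  induction is with
  | nil => rfl
  | cons i rest ih =>
    have hrest := ih (fun j hj => H j (by simp [hj]))
    rw [drecLoop, drecLoop, H i (by simp)]
    split
    · cases h2 : r2 i <;> simp [hrest]
    · exact hrest

theorem drec_fuel : ∀ (f g : Nat) (t : List Int) (p : Int),
    ((t.length : Int) - p).toNat < f → ((t.length : Int) - p).toNat < g →
    drec f t p = drec g t p := by
  intro f
  induction f with
  | zero => omega
  | succ f ih =>
    intro g t p hf hg
    cases g with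
    | zero => omega
    | succ g =>
      rw [drec, drec]
      split
      · rfl
      · refine drecLoop_congr _ _ _ _ (fun i hi => ?_)
        rw [PySem.List.mem_pyRange_one] at hi
        exact ih g t (p + i) (by omega) (by omega)

theorem loopBridge (f : Nat) (t : List Int) (p c : Int) (hc : 0 ≤ c) (tv : Int) :
    ∀ is : List Int,
    (∀ i ∈ is, p + i ≠ (t.length : Int) - 1 →
      skokiGo f t (p + i) (c + 1) =
        match drec f t (p + i) with
        | some d => c + 1 + d
        | none => -1) →
    skokiLoop (fun i => skokiGo f t (p + i) (c + 1)) tv is =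
      match drecLoop (fun i => drec f t (p + i)) tv is with
      | some d => c + d
      | none => -1 := by
  intro is
  induction is with
  | nil => intro _; simp [skokiLoop, drecLoop]
  | cons i rest ih =>
    intro H
    have hrest := ih (fun j hj => H j (by simp [hj]))
    rw [skokiLoop, drecLoop]
    split
    · by_cases hp : p + i = (t.length : Int) - 1
      · -- leaf child
        cases f with
        | zero =>
          dsimp only [skokiGo, drec]
          rw [if_neg (by norm_num : ¬((-1 : Int) > 0))]
          exact hrest
        | succ f =>
          rw [skokiGo, drec, if_pos hp, if_pos hp]
          dsimp only
          rw [if_pos (by omega : c + 1 > 0)]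
          show c + 1 = c + (0 + 1)
          omega
      · rw [H i (by simp) hp]
        cases hd : drec f t (p + i) with
        | some d' =>
          have := drec_nonneg f t (p + i) d' hd
          dsimp only
          rw [if_pos (by omega : c + 1 + d' > 0)]
          show c + 1 + d' = c + (d' + 1)
          omega
        | none =>
          dsimp only
          rw [if_neg (by omega : ¬((-1 : Int) > 0))]
          exact hrest
    · exact hrest

theorem skokiGo_drec : ∀ (f : Nat) (t : List Int) (p c : Int), 0 ≤ c → p ≠ (t.length : Int) - 1 →
    skokiGo f t p c =
      match drec f t p with
      | some d => c + d
      | none => -1 := by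
  intro f
  induction f with
  | zero => intro t p c _ _; simp [skokiGo, drec]
  | succ f ih =>
    intro t p c hc hp
    rw [skokiGo, drec, if_neg hp, if_neg hp]
    exact loopBridge f t p c hc (tget t p) _
      (fun i _ hpi => ih t (p + i) (c + 1) (by omega) hpi)

def MemoValid (t : List Int) (m : PySem.Dict Int (Option Int)) : Prop :=
  ∀ p v, m.get? p = some v → v = drec (((t.length : Int) - p).toNat + 1) t p

theorem depthLoop_drecLoop (f : Nat) (t : List Int) (p : Int) (tv : Int) :
    ∀ is : List Int,
    (∀ i ∈ is, ∀ mm, MemoValid t mm →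
      (depthGo f t (p + i) mm).1 = drec f t (p + i) ∧
      MemoValid t (depthGo f t (p + i) mm).2) →
    ∀ m, MemoValid t m →
      (depthLoop (fun i mm => depthGo f t (p + i) mm) tv is m).1 =
        drecLoop (fun i => drec f t (p + i)) tv is ∧
      MemoValid t (depthLoop (fun i mm => depthGo f t (p + i) mm) tv is m).2 := by
  intro is
  induction is with
  | nil => intro _ m hm; exact ⟨rfl, hm⟩
  | cons i rest ih =>
    intro H m hm
    have hrest := ih (fun j hj => H j (by simp [hj]))
    obtain ⟨h1, h2⟩ := H i (by simp) m hm
    rw [depthLoop, drecLoop]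
    split
    · rcases hpair : depthGo f t (p + i) m with ⟨v, mm⟩
      rw [hpair] at h1 h2
      rw [← h1]
      cases v with
      | some d => exact ⟨rfl, h2⟩
      | none => exact hrest mm h2
    · exact hrest m hm

theorem depthGo_drec : ∀ (f : Nat) (t : List Int) (p : Int)
    (m : PySem.Dict Int (Option Int)),
    ((t.length : Int) - p).toNat < f → MemoValid t m →
    (depthGo f t p m).1 = drec f t p ∧ MemoValid t (depthGo f t p m).2 := by
  intro f
  induction f with
  | zero => omega
  | succ f ih =>
    intro t p m hf hm
    rw [depthGo, drec]
    split
    · exact ⟨rfl, hm⟩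
    · rename_i hp
      cases hget : m.get? p with
      | some v =>
        refine ⟨?_, hm⟩
        dsimp only
        rw [hm p v hget,
          drec_fuel (((t.length : Int) - p).toNat + 1) (f + 1) t p (by omega) hf,
          drec, if_neg hp]
      | none =>
        have hloop := depthLoop_drecLoop f t p (tget t p)
          (PySem.List.pyRange 1 ((t.length : Int) - p) 1)
          (fun i hi mm hmm => by
            rw [PySem.List.mem_pyRange_one] at hi
            exact ih t (p + i) mm (by omega) hmm)
          m hm
        dsimp only
        refine ⟨hloop.1, ?_⟩
        intro q w hw
        rw [PySem.Dict.get?_insert] at hw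
        by_cases hk : q = p
        · rw [if_pos hk] at hw
          subst hk
          simp only [Option.some.injEq] at hw
          have hval : w = drec (f + 1) t q := by
            rw [drec, if_neg hp, ← hw, hloop.1]
          rw [hval]
          exact drec_fuel _ _ t q hf (by omega)
        · rw [if_neg hk] at hw
          exact hloop.2 q w hw

-- ===== VERDICT (by name: the statement is the Claim_ definition above) =====
theorem skoki_spec : Claim_equal_skoki := by
  intro t ind cnt _ hpre
  unfold Spec_skoki skoki skoki_alt
  have hempty : MemoValid t PySem.Dict.empty := by
    intro q w hw
    rw [PySem.Dict.get?_empty] at hw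
    exact absurd hw (by simp)
  have hd := depthGo_drec ((((t.length : Int) - ind).toNat) + 1) t ind
    PySem.Dict.empty (by omega) hempty
  rw [hd.1]
  by_cases h : ind = (t.length : Int) - 1
  · rw [skokiGo, if_pos h, drec, if_pos h]
    show cnt = cnt + 0
    omega
  · rw [skokiGo_drec _ t ind cnt hpre.2 h]
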